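-- pv_equiv track=rewrite | github.com/wiktorwozny/algorithms-and-datastructures | dynamicprogramming/zad2k.py | f
-- ===== SOURCE A (Python) =====
-- def f(a, b, S, DP):
--
--     if DP[a][b] is not None:
--         return DP[a][b]
--
--     if a == b:
--         return 1
--
--     if a + 1 == b:
--         if S[a] == S[b]:
--             return 2
--         return 0
--
--     if S[a] != S[b]:
--         DP[a][b] = 0
--         return 0
--     else:
--         if f(a + 1, b - 1, S, DP) == 0:
--             DP[a][b] = 0
--             return 0
--         else:
--             DP[a][b] = f(a + 1, b - 1, S, DP) + 2
--             return DP[a][b]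
-- ===== SOURCE B (Python) =====
-- def f(a, b, S, DP):
--     # Count-and-closed-unwind re-implementation (mutates DP like the original):
--     # first a pure counting descent along the (i+1, j-1) chain (no stack, no
--     # recursion), then the terminal value, then one arithmetic pass that fills
--     # the memo cells back up.
--     i, j, d = a, b, 0
--     while DP[i][j] is None and i != j and i + 1 != j and S[i] == S[j]:
--         i, j, d = i + 1, j - 1, d + 1
--     if DP[i][j] is not None:
--         res = DP[i][j]
--     elif i == j:
--         res = 1
--     elif i + 1 == j:
--         res = 2 if S[i] == S[j] else 0
--     else:
--         DP[i][j] = 0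
--         res = 0
--     for k in range(1, d + 1):
--         res = 0 if res == 0 else res + 2
--         DP[i - k][j + k] = res
--     return res
-- ===== Notes on version B (the rewrite author's own statement) =====
-- stated objective: alternative
-- what changed: Replaces A's memoized recursion (with its double recursive call) by an iterative counting descent along the (i+1,j-1) chain that keeps only the indices and a depth counter (no recursion, no stack of frames), a single terminal-value computation, and one arithmetic for-loop that fills the memo cells back up.
-- outside the precondition, e.g. on f(0, 3, 'aaaa', [[None, None, None, None], [None, None, 3], [], []]): A returns 5, B returns 5
import Mathlib
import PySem

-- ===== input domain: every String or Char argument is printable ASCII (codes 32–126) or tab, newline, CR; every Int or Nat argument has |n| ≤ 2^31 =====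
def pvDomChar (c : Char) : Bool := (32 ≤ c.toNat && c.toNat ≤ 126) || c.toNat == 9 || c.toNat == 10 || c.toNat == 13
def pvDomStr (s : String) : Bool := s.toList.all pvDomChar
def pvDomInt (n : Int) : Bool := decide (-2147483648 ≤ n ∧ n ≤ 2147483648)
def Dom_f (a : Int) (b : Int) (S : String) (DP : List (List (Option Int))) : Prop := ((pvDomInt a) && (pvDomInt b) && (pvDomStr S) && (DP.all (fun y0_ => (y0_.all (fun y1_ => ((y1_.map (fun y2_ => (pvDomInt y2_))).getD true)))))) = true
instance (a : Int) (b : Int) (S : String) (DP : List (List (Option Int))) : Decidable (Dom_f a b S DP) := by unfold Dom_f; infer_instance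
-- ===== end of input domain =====

-- B replaces A's memoized recursion by an iterative counting descent (indices + depth only),
-- a terminal-value computation, and one arithmetic back-fill loop; both Pythons mutate DP
-- identically, and the theorems here are about the RETURN value.

-- ===== PORT A =====

-- DP[a][b] : first index DP, then index the row (none = IndexError)
def readCell (DP : List (List (Option Int))) (a b : Int) : Option (Option Int) :=
  match PySem.List.pyGet? DP a with
  | none => none
  | some row => PySem.List.pyGet? row b

-- DP[a][b] = v  (identity where Python would raise; only used after a successful read)
def writeDP (DP : List (List (Option Int))) (a b : Int) (v : Int) : List (List (Option Int)) :=
  match PySem.List.pyGet? DP a with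
  | none => DP
  | some row => PySem.List.pySetD DP a (PySem.List.pySetD row b (some v))

-- literal transliteration of A's recursion, threading the mutated DP; fuel is a totality guard only
def fAux : Nat → Int → Int → String → List (List (Option Int)) → Int × List (List (Option Int))
  | 0, _, _, _, DP => (0, DP)
  | Nat.succ n, a, b, S, DP =>
    match readCell DP a b with
    | none => (0, DP)                   -- Python: IndexError
    | some (some v) => (v, DP)          -- memo hit
    | some none =>
      if a = b then (1, DP)
      else if a + 1 = b then
        match PySem.Str.pyGet? S a, PySem.Str.pyGet? S b with
        | some ca, some cb => (if ca = cb then 2 else 0, DP)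
        | _, _ => (0, DP)               -- Python: IndexError
      else
        match PySem.Str.pyGet? S a, PySem.Str.pyGet? S b with
        | some ca, some cb =>
          if ca ≠ cb then (0, writeDP DP a b 0)
          else
            let p1 := fAux n (a + 1) (b - 1) S DP
            if p1.1 = 0 then (0, writeDP p1.2 a b 0)
            else
              let p2 := fAux n (a + 1) (b - 1) S p1.2
              (p2.1 + 2, writeDP p2.2 a b (p2.1 + 2))
        | _, _ => (0, DP)               -- Python: IndexError

def f (a : Int) (b : Int) (S : String) (DP : List (List (Option Int))) : Int :=
  (fAux ((b - a).toNat + 1) a b S DP).1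

-- ===== PORT B =====

-- B's while-condition: DP[i][j] is None and i != j and i+1 != j and S[i] == S[j],
-- with Python's short-circuiting; 'false' where Python would raise (excluded by Pre_)
def contB (i j : Int) (S : String) (DP : List (List (Option Int))) : Bool :=
  match readCell DP i j with
  | some none =>
    if i = j then false
    else if i + 1 = j then false
    else match PySem.Str.pyGet? S i, PySem.Str.pyGet? S j with
      | some ca, some cb => ca = cb
      | _, _ => false                   -- Python: IndexError
  | _ => false                          -- memo hit (or IndexError on DP[i][j])

-- B's counting while-loop: final (i, j, depth); fuel is a totality guard only
def countB : Nat → Int → Int → String → List (List (Option Int)) → Int × Int × Nat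
  | 0, i, j, _, _ => (i, j, 0)
  | Nat.succ n, i, j, S, DP =>
    if contB i j S DP then
      let t := countB n (i + 1) (j - 1) S DP
      (t.1, t.2.1, t.2.2 + 1)
    else (i, j, 0)

-- B's terminal value at the bottom of the chain, plus the one DP write of that branch
def termB (i j : Int) (S : String) (DP : List (List (Option Int))) :
    Int × List (List (Option Int)) :=
  match readCell DP i j with
  | some (some v) => (v, DP)
  | _ =>
    if i = j then (1, DP)
    else if i + 1 = j then
      match PySem.Str.pyGet? S i, PySem.Str.pyGet? S j with
      | some ca, some cb => (if ca = cb then 2 else 0, DP)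
      | _, _ => (0, DP)                 -- Python: IndexError
    else (0, writeDP DP i j 0)

-- one iteration of B's back-fill for-loop
def fillB (acc : Int × List (List (Option Int))) (k : Int) (i j : Int) :
    Int × List (List (Option Int)) :=
  let res := if acc.1 = 0 then 0 else acc.1 + 2
  (res, writeDP acc.2 (i - k) (j + k) res)

def f_alt (a : Int) (b : Int) (S : String) (DP : List (List (Option Int))) : Int :=
  let t := countB ((b - a).toNat + 1) a b S DP
  let i := t.1
  let j := t.2.1
  let d : Int := (t.2.2 : Int)
  let w := termB i j S DP
  ((PySem.List.pyRange 1 (d + 1) 1).foldl (fun acc k => fillB acc k i j) w).1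

-- ===== PRECONDITION & SPEC =====
-- Pre_ admits the natural memo-table domain (0 ≤ a ≤ b < len(S), DP a len(S)×len(S) table) plus every
-- input on which A returns without recursing (memo hit or base case right at (a,b)); it excludes inputs
-- where A raises IndexError, and irregular inputs (a > b, ragged/oversized DP) on which A only returns
-- by recursing into accidental wraparound/memo territory.
def Pre_f (a : Int) (b : Int) (S : String) (DP : List (List (Option Int))) : Prop :=
  (0 ≤ a ∧ a ≤ b ∧ b < (S.toList.length : Int) ∧ DP.length = S.toList.length ∧
    ∀ row ∈ DP, row.length = S.toList.length)
  ∨ ((readCell DP a b).isSome = true ∧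
      (readCell DP a b ≠ some none ∨ a = b ∨
        ((a + 1 = b ∨ PySem.Str.pyGet? S a ≠ PySem.Str.pyGet? S b) ∧
          (PySem.Str.pyGet? S a).isSome = true ∧ (PySem.Str.pyGet? S b).isSome = true)))
instance (a : Int) (b : Int) (S : String) (DP : List (List (Option Int))) : Decidable (Pre_f a b S DP) := by unfold Pre_f; infer_instance

def pvWitness_f : Int × Int × String × List (List (Option Int)) :=
  (0, 2, "aba", [[none, none, none], [none, none, none], [none, none, none]])

def Spec_f (a : Int) (b : Int) (S : String) (DP : List (List (Option Int))) (out : Int) : Prop := out = f_alt a b S DP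
instance (a : Int) (b : Int) (S : String) (DP : List (List (Option Int))) (out : Int) : Decidable (Spec_f a b S DP out) := by unfold Spec_f; infer_instance

-- ===== CLAIM (what is proved, stated in full; the proofs are below) =====
def Claim_equal_f : Prop := ∀ (a : Int) (b : Int) (S : String) (DP : List (List (Option Int))), Dom_f a b S DP → Pre_f a b S DP → Spec_f a b S DP (f a b S DP)

-- ===== LEMMAS AND PROOFS =====

-- the pure value both programs compute along the chain, reading only the ORIGINAL DP
def stepv (r : Int) : Int := if r = 0 then 0 else r + 2

def chain : Nat → Int → Int → String → List (List (Option Int)) → Int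
  | 0, _, _, _, _ => 0
  | Nat.succ n, a, b, S, DP =>
    match readCell DP a b with
    | none => 0
    | some (some v) => v
    | some none =>
      if a = b then 1
      else if a + 1 = b then
        match PySem.Str.pyGet? S a, PySem.Str.pyGet? S b with
        | some ca, some cb => (if ca = cb then 2 else 0)
        | _, _ => 0
      else
        match PySem.Str.pyGet? S a, PySem.Str.pyGet? S b with
        | some ca, some cb =>
          if ca ≠ cb then 0 else stepv (chain n (a + 1) (b - 1) S DP)
        | _, _ => 0

def InvDP (S : String) (DP : List (List (Option Int))) : Prop :=
  DP.length = S.toList.length ∧ ∀ row ∈ DP, row.length = S.toList.length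

lemma getSome {α : Type} (xs : List α) (i : Int) (h0 : 0 ≤ i) (h : i.toNat < xs.length) :
    PySem.List.pyGet? xs i = some xs[i.toNat] := by
  have hi := PySem.List.pyGet?_natCast xs i.toNat
  rw [Int.toNat_of_nonneg h0] at hi
  rw [hi, List.getElem?_eq_getElem h]

lemma strGetSome (S : String) (i : Int) (h0 : 0 ≤ i) (h : i.toNat < S.toList.length) :
    PySem.Str.pyGet? S i = some S.toList[i.toNat] := by
  have hi := PySem.Str.pyGet?_natCast (s := S) (n := i.toNat)
  rw [Int.toNat_of_nonneg h0] at hi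
  rw [hi, List.getElem?_eq_getElem h]

lemma writeDP_inv (S : String) (DP : List (List (Option Int))) (a b v : Int)
    (hInv : InvDP S DP) (h0a : 0 ≤ a) (h0b : 0 ≤ b) : InvDP S (writeDP DP a b v) := by
  unfold writeDP
  cases hr : PySem.List.pyGet? DP a with
  | none => exact hInv
  | some row =>
    dsimp only
    rw [PySem.List.pySetD_of_nonneg _ _ h0a, PySem.List.pySetD_of_nonneg _ _ h0b]
    constructor
    · simpa using hInv.1
    · intro r hr'
      rcases List.mem_or_eq_of_mem_set hr' with h | h
      · exact hInv.2 r h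
      · subst h
        have hrowmem : row ∈ DP := PySem.List.mem_of_pyGet?_eq_some DP hr
        simpa using hInv.2 row hrowmem

lemma readCell_write (S : String) (DP : List (List (Option Int))) (a b v : Int)
    (hInv : InvDP S DP) (h0a : 0 ≤ a) (ha : a.toNat < S.toList.length)
    (h0b : 0 ≤ b) (hb : b.toNat < S.toList.length) :
    readCell (writeDP DP a b v) a b = some (some v) := by
  have haD : a.toNat < DP.length := by rw [hInv.1]; exact ha
  have hrow : PySem.List.pyGet? DP a = some DP[a.toNat] := getSome DP a h0a haD
  unfold writeDP
  rw [hrow]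
  dsimp only
  rw [PySem.List.pySetD_of_nonneg _ _ h0a, PySem.List.pySetD_of_nonneg _ _ h0b]
  have hlenrow : DP[a.toNat].length = S.toList.length := hInv.2 _ (List.getElem_mem haD)
  have h1 : PySem.List.pyGet? (DP.set a.toNat (DP[a.toNat].set b.toNat (some v))) a
      = some (DP[a.toNat].set b.toNat (some v)) := by
    have hl : a.toNat < (DP.set a.toNat (DP[a.toNat].set b.toNat (some v))).length := by
      simpa using haD
    rw [getSome _ a h0a hl]
    simp
  unfold readCell
  rw [h1]
  dsimp only
  have hbr : b.toNat < (DP[a.toNat].set b.toNat (some v)).length := by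
    simp [hlenrow]; exact hb
  rw [getSome _ b h0b hbr]
  simp

-- main lemma for A: value = chain, the memo stays well-formed, and re-running is stable
lemma mainA (S : String) : ∀ (n : Nat) (a b : Int) (DP : List (List (Option Int))),
    0 ≤ a → a ≤ b → b < (S.toList.length : Int) → InvDP S DP →
    (fAux n a b S DP).1 = chain n a b S DP ∧ InvDP S (fAux n a b S DP).2 ∧
      fAux n a b S (fAux n a b S DP).2 = fAux n a b S DP := by
  intro n
  induction n with
  | zero => intro a b DP _ _ _ hInv; exact ⟨rfl, hInv, rfl⟩
  | succ n ih =>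
    intro a b DP h0a hab hbL hInv
    have h0b : 0 ≤ b := le_trans h0a hab
    have haL : a.toNat < S.toList.length := by omega
    have hbL' : b.toNat < S.toList.length := by omega
    have haD : a.toNat < DP.length := by rw [hInv.1]; exact haL
    have hrow : PySem.List.pyGet? DP a = some DP[a.toNat] := getSome DP a h0a haD
    have hlenrow : DP[a.toNat].length = S.toList.length := hInv.2 _ (List.getElem_mem haD)
    have hbrow : b.toNat < DP[a.toNat].length := by rw [hlenrow]; exact hbL'
    have hcell : readCell DP a b = some DP[a.toNat][b.toNat] := by
      unfold readCell; rw [hrow]; dsimp only; rw [getSome _ b h0b hbrow]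
    have hSa : PySem.Str.pyGet? S a = some S.toList[a.toNat] := strGetSome S a h0a haL
    have hSb : PySem.Str.pyGet? S b = some S.toList[b.toNat] := strGetSome S b h0b hbL'
    cases hv : DP[a.toNat][b.toNat] with
    | some v =>
      have hcell' : readCell DP a b = some (some v) := by rw [hcell, hv]
      have hout : fAux (Nat.succ n) a b S DP = (v, DP) := by simp only [fAux, hcell']
      refine ⟨?_, ?_, ?_⟩
      · rw [hout]; simp only [chain, hcell']
      · rw [hout]; exact hInv
      · rw [hout, hout]
    | none =>
      have hcell' : readCell DP a b = some none := by rw [hcell, hv]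
      by_cases heq : a = b
      · refine ⟨?_, ?_, ?_⟩ <;> simp only [fAux, chain, hcell', if_pos heq]
        exact hInv
      · by_cases hsucc : a + 1 = b
        · refine ⟨?_, ?_, ?_⟩ <;>
            simp only [fAux, chain, hcell', if_neg heq, if_pos hsucc, hSa, hSb]
          exact hInv
        · have hgap : a + 2 ≤ b := by omega
          by_cases hch : S.toList[a.toNat] = S.toList[b.toNat]
          · -- matching characters: recurse
            obtain ⟨ih1, ihInv, ihstab⟩ := ih (a + 1) (b - 1) DP (by omega) (by omega) (by omega) hInv
            by_cases hz : (fAux n (a + 1) (b - 1) S DP).1 = 0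
            · have hout : fAux (Nat.succ n) a b S DP = (0, writeDP (fAux n (a + 1) (b - 1) S DP).2 a b 0) := by
                simp only [fAux, hcell', if_neg heq, if_neg hsucc, hSa, hSb]
                simp [hch, hz]
              refine ⟨?_, ?_, ?_⟩
              · rw [hout]
                simp only [chain, hcell', if_neg heq, if_neg hsucc, hSa, hSb]
                simp [hch, stepv, ← ih1, hz]
              · rw [hout]; exact writeDP_inv S _ a b 0 ihInv h0a h0b
              · rw [hout]
                have hmemo : readCell (writeDP (fAux n (a + 1) (b - 1) S DP).2 a b 0) a b = some (some 0) :=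
                  readCell_write S _ a b 0 ihInv h0a haL h0b hbL'
                simp only [fAux, hmemo]
            · have hout : fAux (Nat.succ n) a b S DP =
                  ((fAux n (a + 1) (b - 1) S DP).1 + 2,
                    writeDP (fAux n (a + 1) (b - 1) S DP).2 a b ((fAux n (a + 1) (b - 1) S DP).1 + 2)) := by
                simp only [fAux, hcell', if_neg heq, if_neg hsucc, hSa, hSb]
                simp [hch, hz, ihstab]
              refine ⟨?_, ?_, ?_⟩
              · rw [hout]
                simp only [chain, hcell', if_neg heq, if_neg hsucc, hSa, hSb]
                simp [hch, stepv, ← ih1, hz]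
              · rw [hout]; exact writeDP_inv S _ a b _ ihInv h0a h0b
              · rw [hout]
                have hmemo : readCell (writeDP (fAux n (a + 1) (b - 1) S DP).2 a b
                    ((fAux n (a + 1) (b - 1) S DP).1 + 2)) a b
                    = some (some ((fAux n (a + 1) (b - 1) S DP).1 + 2)) :=
                  readCell_write S _ a b _ ihInv h0a haL h0b hbL'
                simp only [fAux, hmemo]
          · -- mismatch: write 0 and stop
            have hout : fAux (Nat.succ n) a b S DP = (0, writeDP DP a b 0) := by
              simp only [fAux, hcell', if_neg heq, if_neg hsucc, hSa, hSb]
              simp [hch]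
            refine ⟨?_, ?_, ?_⟩
            · rw [hout]
              simp only [chain, hcell', if_neg heq, if_neg hsucc, hSa, hSb]
              simp [hch]
            · rw [hout]; exact writeDP_inv S DP a b 0 hInv h0a h0b
            · rw [hout]
              have hmemo : readCell (writeDP DP a b 0) a b = some (some 0) :=
                readCell_write S DP a b 0 hInv h0a haL h0b hbL'
              simp only [fAux, hmemo]

-- the back-fill fold applies stepv once per counted level, whatever the DP writes do
lemma foldFill (i j : Int) : ∀ (l : List Int) (r : Int) (D : List (List (Option Int))),
    (l.foldl (fun acc k => fillB acc k i j) (r, D)).1 = stepv^[l.length] r := by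
  intro l
  induction l with
  | nil => intro r D; rfl
  | cons k l ih =>
    intro r D
    have hstep : fillB (r, D) k i j = (stepv r, (fillB (r, D) k i j).2) := by
      simp only [fillB, stepv]
    rw [List.foldl_cons, hstep, ih, List.length_cons, Function.iterate_succ_apply]

-- main lemma for B: the counted descent reaches a terminal whose value, iterated
-- through stepv depth-many times, is the chain value (with the same fuel)
lemma mainB (S : String) : ∀ (n : Nat) (i j : Int) (DP : List (List (Option Int))),
    0 ≤ i → i ≤ j → j < (S.toList.length : Int) → InvDP S DP → j - i < 2 * n →
    stepv^[(countB n i j S DP).2.2] (termB (countB n i j S DP).1 (countB n i j S DP).2.1 S DP).1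
      = chain n i j S DP := by
  intro n
  induction n with
  | zero => intro i j DP h0i hij _ _ hfuel; omega
  | succ n ih =>
    intro i j DP h0i hij hjL hInv hfuel
    have h0j : 0 ≤ j := le_trans h0i hij
    have hiL : i.toNat < S.toList.length := by omega
    have hjL' : j.toNat < S.toList.length := by omega
    have hiD : i.toNat < DP.length := by rw [hInv.1]; exact hiL
    have hrow : PySem.List.pyGet? DP i = some DP[i.toNat] := getSome DP i h0i hiD
    have hlenrow : DP[i.toNat].length = S.toList.length := hInv.2 _ (List.getElem_mem hiD)
    have hjrow : j.toNat < DP[i.toNat].length := by rw [hlenrow]; exact hjL'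
    have hcell : readCell DP i j = some DP[i.toNat][j.toNat] := by
      unfold readCell; rw [hrow]; dsimp only; rw [getSome _ j h0j hjrow]
    have hSi : PySem.Str.pyGet? S i = some S.toList[i.toNat] := strGetSome S i h0i hiL
    have hSj : PySem.Str.pyGet? S j = some S.toList[j.toNat] := strGetSome S j h0j hjL'
    cases hv : DP[i.toNat][j.toNat] with
    | some v =>
      have hcell' : readCell DP i j = some (some v) := by rw [hcell, hv]
      have hc : contB i j S DP = false := by simp only [contB, hcell']
      simp only [countB, hc, if_neg Bool.false_ne_true, termB, chain, hcell',
        Function.iterate_zero, id]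
    | none =>
      have hcell' : readCell DP i j = some none := by rw [hcell, hv]
      by_cases heq : i = j
      · have hc : contB i j S DP = false := by simp only [contB, hcell', if_pos heq]
        simp only [countB, hc, if_neg Bool.false_ne_true, termB, chain, hcell',
          if_pos heq, Function.iterate_zero, id]
      · by_cases hsucc : i + 1 = j
        · have hc : contB i j S DP = false := by
            simp only [contB, hcell', if_neg heq, if_pos hsucc]
          simp only [countB, hc, if_neg Bool.false_ne_true, termB, chain, hcell',
            if_neg heq, if_pos hsucc, hSi, hSj, Function.iterate_zero, id]
        · have hgap : i + 2 ≤ j := by omega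
          by_cases hch : S.toList[i.toNat] = S.toList[j.toNat]
          · -- matching characters: the while loop takes one more step
            have hc : contB i j S DP = true := by
              simp only [contB, hcell', if_neg heq, if_neg hsucc, hSi, hSj]
              simp [hch]
            have hstep : countB (Nat.succ n) i j S DP
                = ((countB n (i + 1) (j - 1) S DP).1, (countB n (i + 1) (j - 1) S DP).2.1,
                    (countB n (i + 1) (j - 1) S DP).2.2 + 1) := by
              simp only [countB, hc, if_pos]
            rw [hstep]
            have ihh := ih (i + 1) (j - 1) DP (by omega) (by omega) (by omega) hInv (by omega)
            simp only [Function.iterate_succ_apply']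
            rw [ihh]
            simp only [chain, hcell', if_neg heq, if_neg hsucc, hSi, hSj]
            simp [hch]
          · -- mismatch: terminal with value 0
            have hc : contB i j S DP = false := by
              simp only [contB, hcell', if_neg heq, if_neg hsucc, hSi, hSj]
              simp [hch]
            simp only [countB, hc, if_neg Bool.false_ne_true, termB, chain, hcell',
              if_neg heq, if_neg hsucc, hSi, hSj, Function.iterate_zero, id]
            simp [hch]

-- f_alt's value is stepv iterated over the terminal value, by the fold lemma
lemma falt_eval (a b : Int) (S : String) (DP : List (List (Option Int))) :
    f_alt a b S DP
      = stepv^[(countB ((b - a).toNat + 1) a b S DP).2.2]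
          (termB (countB ((b - a).toNat + 1) a b S DP).1
            (countB ((b - a).toNat + 1) a b S DP).2.1 S DP).1 := by
  unfold f_alt
  rw [foldFill]
  congr 1
  rw [PySem.List.length_pyRange_one]
  omega

-- ===== VERDICT (by name: the statement is the Claim_ definition above) =====
theorem f_spec : Claim_equal_f := by
  intro a b S DP _ hPre
  unfold Spec_f
  rcases hPre with ⟨h0a, hab, hbL, hlen, hrows⟩ | ⟨hsome, hrest⟩
  · have hInv : InvDP S DP := ⟨hlen, hrows⟩
    have hA := (mainA S ((b - a).toNat + 1) a b DP h0a hab hbL hInv).1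
    have hB := mainB S ((b - a).toNat + 1) a b DP h0a hab hbL hInv (by omega)
    unfold f
    rw [hA, falt_eval, hB]
  · -- A returns without recursing: both ports take the same terminal branch
    unfold f
    rw [falt_eval]
    cases hc : readCell DP a b with
    | none => rw [hc] at hsome; simp at hsome
    | some o =>
      cases o with
      | some v =>
        have hcb : contB a b S DP = false := by simp only [contB, hc]
        simp [fAux, countB, termB, hc, hcb]
      | none =>
        rcases hrest with hne | hab | ⟨hor, hsa, hsb⟩
        · exact absurd hc hne
        · subst hab
          have hcb : contB a a S DP = false := by simp [contB, hc]
          simp [fAux, countB, termB, hc, hcb]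
        · cases hga : PySem.Str.pyGet? S a with
          | none => rw [hga] at hsa; simp at hsa
          | some ca =>
            cases hgb : PySem.Str.pyGet? S b with
            | none => rw [hgb] at hsb; simp at hsb
            | some cb =>
              have hga' : PySem.List.pyGet? S.toList a = some ca := by simpa using hga
              have hgb' : PySem.List.pyGet? S.toList b = some cb := by simpa using hgb
              by_cases hab2 : a = b
              · subst hab2
                have hcb : contB a a S DP = false := by simp [contB, hc]
                simp [fAux, countB, termB, hc, hcb]
              · by_cases hsucc : a + 1 = b
                · have hcb : contB a b S DP = false := by
                    simp only [contB, hc, if_neg hab2, if_pos hsucc]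
                  simp [fAux, countB, termB, hc, hcb, hab2, hsucc, hga', hgb']
                · have hcane : ca ≠ cb := by
                    rcases hor with h | h
                    · exact absurd h hsucc
                    · intro hcc; exact h (by rw [hga, hgb, hcc])
                  have hcb : contB a b S DP = false := by
                    simp [contB, hc, hab2, hsucc, hga', hgb', hcane]
                  simp [fAux, countB, termB, hc, hcb, hab2, hsucc, hga', hgb', hcane]
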